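-- pv_equiv track=rewrite | github.com/wildansupernova/Imbalanced-Data-Multilabel | MLSOL_guideTest.py | countC1C0
-- ===== SOURCE A (Python) =====
-- def countC1C0(y, numLabels):
--     c1 = [0]*numLabels
--     c0 = [0]*numLabels
--
--     for e in y:
--         for j in range(numLabels):
--             if e[j] == 0:
--                 c0[j]+=1
--             elif e[j] == 1:
--                 c1[j]+=1
--
--     return c0, c1
-- ===== SOURCE B (Python) =====
-- def countC1C0(y, numLabels):
--     cols = [[row[j] for row in y] for j in range(numLabels)]
--     return [c.count(0) for c in cols], [c.count(1) for c in cols]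
-- ===== Notes on version B (the rewrite author's own statement) =====
-- stated objective: simpler
-- what changed: Transposes the traversal: instead of row-major nested loops that increment preallocated counter lists in place, B extracts each label column once and uses list.count to get the 0- and 1-counts directly.
import Mathlib
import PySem

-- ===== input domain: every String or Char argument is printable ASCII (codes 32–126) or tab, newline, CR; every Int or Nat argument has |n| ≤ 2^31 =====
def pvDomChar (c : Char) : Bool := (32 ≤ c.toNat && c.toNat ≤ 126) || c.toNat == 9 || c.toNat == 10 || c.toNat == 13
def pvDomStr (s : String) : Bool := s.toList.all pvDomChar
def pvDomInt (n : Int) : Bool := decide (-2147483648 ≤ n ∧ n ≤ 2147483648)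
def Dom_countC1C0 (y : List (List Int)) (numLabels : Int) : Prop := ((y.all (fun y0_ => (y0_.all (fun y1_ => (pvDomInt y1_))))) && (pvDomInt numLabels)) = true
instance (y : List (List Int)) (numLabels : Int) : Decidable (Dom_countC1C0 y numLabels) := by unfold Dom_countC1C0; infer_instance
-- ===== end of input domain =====

-- B changes the decomposition: column-major extraction plus list.count, instead of A's
-- row-major nested loops mutating preallocated counter lists in place (objective: simpler).

-- ===== PORT A =====
-- e[j], c0[j], c1[j] are always in range under Pre_; the pyGetD/pySetD defaults are never hit there.
def countC1C0 (y : List (List Int)) (numLabels : Int) : List Int × List Int :=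
  let c1 : List Int := PySem.List.pyRepeat [(0 : Int)] numLabels
  let c0 : List Int := PySem.List.pyRepeat [(0 : Int)] numLabels
  let s :=
    y.foldl (fun (s : List Int × List Int) e =>
      (PySem.List.pyRange 0 numLabels 1).foldl (fun (s : List Int × List Int) j =>
        if PySem.List.pyGetD e j 2 == 0 then
          (PySem.List.pySetD s.1 j (PySem.List.pyGetD s.1 j 0 + 1), s.2)
        else if PySem.List.pyGetD e j 2 == 1 then
          (s.1, PySem.List.pySetD s.2 j (PySem.List.pyGetD s.2 j 0 + 1))
        else s) s) (c0, c1)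
  (s.1, s.2)

-- ===== PORT B =====
def countC1C0_alt (y : List (List Int)) (numLabels : Int) : List Int × List Int :=
  let cols : List (List Int) :=
    (PySem.List.pyRange 0 numLabels 1).map (fun j => y.map (fun row => PySem.List.pyGetD row j 3))
  (cols.map (fun c => (PySem.List.count c 0 : Int)),
   cols.map (fun c => (PySem.List.count c 1 : Int)))

-- ===== PRECONDITION & SPEC =====
-- Pre_ excludes exactly the inputs where Python A raises IndexError: some row shorter than
-- numLabels while numLabels > 0 (Python B raises IndexError on the same inputs).
def Pre_countC1C0 (y : List (List Int)) (numLabels : Int) : Prop :=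
  numLabels ≤ 0 ∨ ∀ e ∈ y, numLabels ≤ (e.length : Int)
instance (y : List (List Int)) (numLabels : Int) : Decidable (Pre_countC1C0 y numLabels) := by
  unfold Pre_countC1C0; infer_instance
def pvWitness_countC1C0 : List (List Int) × Int := ([[0, 1], [1, 1], [2, 0]], 2)
def Spec_countC1C0 (y : List (List Int)) (numLabels : Int) (out : List Int × List Int) : Prop := out = countC1C0_alt y numLabels
instance (y : List (List Int)) (numLabels : Int) (out : List Int × List Int) : Decidable (Spec_countC1C0 y numLabels out) := by unfold Spec_countC1C0; infer_instance

-- ===== CLAIM (what is proved, stated in full; the proofs are below) =====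
def Claim_equal_countC1C0 : Prop := ∀ (y : List (List Int)) (numLabels : Int), Dom_countC1C0 y numLabels → Pre_countC1C0 y numLabels → Spec_countC1C0 y numLabels (countC1C0 y numLabels)

-- ===== LEMMAS AND PROOFS =====

-- the per-index step of A's inner loop, acting on one counter list
def pvStep (e : List Int) (v : Int) (s : List Int) (j : Int) : List Int :=
  if PySem.List.pyGetD e j 2 == v then PySem.List.pySetD s j (PySem.List.pyGetD s j 0 + 1) else s

theorem pvStep_length (e : List Int) (v : Int) (s : List Int) (j : Int) :
    (pvStep e v s j).length = s.length := by
  unfold pvStep; split_ifs <;> simp [PySem.List.length_pySetD]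

theorem pvFold_length (e : List Int) (v : Int) (js : List Int) (s : List Int) :
    (js.foldl (pvStep e v) s).length = s.length := by
  induction js generalizing s with
  | nil => rfl
  | cons j js ih => simp only [List.foldl_cons]; rw [ih, pvStep_length]

theorem pvFold_getD (e : List Int) (v : Int) (js : List Int) (s : List Int)
    (hjs : ∀ j ∈ js, 0 ≤ j ∧ j < (s.length : Int)) (i : Nat) :
    (js.foldl (pvStep e v) s).getD i 0 =
      s.getD i 0 + (js.countP (fun j => j == (i : Int) && (PySem.List.pyGetD e j 2 == v)) : Int) := by
  induction js generalizing s with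
  | nil => simp
  | cons j js ih =>
    obtain ⟨hj0, hjlen⟩ := hjs j (by simp)
    have hlen : (pvStep e v s j).length = s.length := pvStep_length ..
    have htail : ∀ j' ∈ js, 0 ≤ j' ∧ j' < ((pvStep e v s j).length : Int) := by
      intro j' hj'; rw [hlen]; exact hjs j' (by simp [hj'])
    rw [List.foldl_cons, ih (pvStep e v s j) htail]
    have hjnat : j.toNat < s.length := by omega
    have hstep : (pvStep e v s j).getD i 0 =
        s.getD i 0 + (if j == (i : Int) && (PySem.List.pyGetD e j 2 == v) then (1 : Int) else 0) := by
      unfold pvStep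
      by_cases hv : PySem.List.pyGetD e j 2 == v
      · simp only [hv, if_pos, Bool.and_true]
        rw [PySem.List.pySetD_of_nonneg _ _ hj0,
            PySem.List.pyGetD_eq_getElem _ _ hj0 hjlen]
        simp only [List.getD_eq_getElem?_getD, List.getElem?_set]
        by_cases hji : j = (i : Int)
        · have hnat : j.toNat = i := by omega
          have hilen : i < s.length := hnat ▸ hjnat
          simp [hnat, hji, hilen, List.getElem?_eq_getElem hilen]
        · have hne : j.toNat ≠ i := by omega
          simp [hne, beq_iff_eq, hji]
      · simp only [Bool.not_eq_true] at hv
        simp [hv]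
    rw [hstep, List.countP_cons]
    split_ifs with h <;> simp [h] <;> ring

theorem pvCountP_range_single (m : Nat) (i : Nat) (hi : i < m) (q : Int → Bool) :
    ((PySem.List.pyRange 0 (m : Int) 1).countP (fun j => j == (i : Int) && q j)) =
      if q (i : Int) then 1 else 0 := by
  induction m with
  | zero => omega
  | succ m ih =>
    rw [show ((m + 1 : Nat) : Int) = (m : Int) + 1 by push_cast; ring,
        PySem.List.pyRange_one_succ_right (a := 0) (b := (m : Int)) (by omega), List.countP_append]
    by_cases him : i < m
    · rw [ih him]
      have hne : ¬(((m : Int) == (i : Int)) && q (m : Int)) = true := by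
        simp only [Bool.and_eq_true, beq_iff_eq]; rintro ⟨h, -⟩; omega
      simp [List.countP_cons, hne]
    · have hieq : (i : Int) = (m : Int) := by omega
      have hz : (PySem.List.pyRange 0 (m : Int) 1).countP
          (fun j => j == (i : Int) && q j) = 0 := by
        rw [List.countP_eq_zero]
        intro j hj
        have hmem := (PySem.List.mem_pyRange_one).1 hj
        simp only [Bool.and_eq_true, beq_iff_eq]; rintro ⟨h, -⟩; omega
      simp [hz, hieq, List.countP_cons]
      intro a h1 h2 h3; omega

-- column j of y, as B extracts it
def pvCol (y : List (List Int)) (j : Int) : List Int :=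
  y.map (fun row => PySem.List.pyGetD row j 2)

theorem pvOuter_length (v : Int) (n : Int) (y : List (List Int)) (s : List Int) :
    (y.foldl (fun a e => (PySem.List.pyRange 0 n 1).foldl (pvStep e v) a) s).length
      = s.length := by
  induction y generalizing s with
  | nil => rfl
  | cons e y ih => simp only [List.foldl_cons]; rw [ih, pvFold_length]

-- effect of A's whole double loop on one counter list, pointwise: it adds the column count
theorem pvOuter_getD (v : Int) (n : Int) (y : List (List Int)) (s : List Int)
    (hs : (s.length : Int) = n) (i : Nat) (hi : i < s.length) :
    (y.foldl (fun a e => (PySem.List.pyRange 0 n 1).foldl (pvStep e v) a) s).getD i 0 =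
      s.getD i 0 + (PySem.List.count (pvCol y (i : Int)) v : Int) := by
  induction y generalizing s with
  | nil => simp [pvCol, PySem.List.count_eq]
  | cons e y ih =>
    have hjs : ∀ j ∈ PySem.List.pyRange 0 n 1, 0 ≤ j ∧ j < (s.length : Int) := by
      intro j hj
      have := (PySem.List.mem_pyRange_one).1 hj
      constructor <;> omega
    have hlen : ((PySem.List.pyRange 0 n 1).foldl (pvStep e v) s).length = s.length :=
      pvFold_length ..
    rw [List.foldl_cons, ih _ (by rw [hlen]; exact hs) (hlen ▸ hi)]
    have hmn : n = ((n.toNat : Nat) : Int) := by omega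
    have hrow : ((PySem.List.pyRange 0 n 1).foldl (pvStep e v) s).getD i 0 =
        s.getD i 0 + (if PySem.List.pyGetD e (i : Int) 2 == v then (1 : Int) else 0) := by
      rw [pvFold_getD e v _ s hjs i, hmn,
          pvCountP_range_single n.toNat i (by omega) (fun j => PySem.List.pyGetD e j 2 == v)]
      split_ifs <;> simp
    rw [hrow]
    have hcount : (PySem.List.count (pvCol (e :: y) (i : Int)) v : Int) =
        (if PySem.List.pyGetD e (i : Int) 2 == v then (1 : Int) else 0) +
          (PySem.List.count (pvCol y (i : Int)) v : Int) := by
      simp only [pvCol, List.map_cons, PySem.List.count_eq, List.count_cons]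
      split_ifs with h <;> simp [h] <;> push_cast <;> ring
    rw [hcount]; ring

-- A's pair-valued loop body is two independent single-list loops
theorem pvBody_decomp (e : List Int) (n : Int) (s : List Int × List Int) :
    (PySem.List.pyRange 0 n 1).foldl (fun (s : List Int × List Int) j =>
        if PySem.List.pyGetD e j 2 == 0 then
          (PySem.List.pySetD s.1 j (PySem.List.pyGetD s.1 j 0 + 1), s.2)
        else if PySem.List.pyGetD e j 2 == 1 then
          (s.1, PySem.List.pySetD s.2 j (PySem.List.pyGetD s.2 j 0 + 1))
        else s) s =
      ((PySem.List.pyRange 0 n 1).foldl (pvStep e 0) s.1,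
       (PySem.List.pyRange 0 n 1).foldl (pvStep e 1) s.2) := by
  have hfun : (fun (s : List Int × List Int) (j : Int) =>
      if PySem.List.pyGetD e j 2 == 0 then
        (PySem.List.pySetD s.1 j (PySem.List.pyGetD s.1 j 0 + 1), s.2)
      else if PySem.List.pyGetD e j 2 == 1 then
        (s.1, PySem.List.pySetD s.2 j (PySem.List.pyGetD s.2 j 0 + 1))
      else s) = fun s j => (pvStep e 0 s.1 j, pvStep e 1 s.2 j) := by
    funext s j
    unfold pvStep
    by_cases h0 : PySem.List.pyGetD e j 2 == 0
    · have h1 : ¬(PySem.List.pyGetD e j 2 == 1) = true := by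
        simp only [beq_iff_eq] at h0 ⊢; omega
      simp [h0, h1]
    · by_cases h1 : PySem.List.pyGetD e j 2 == 1 <;> simp [h0, h1]
  rw [hfun]
  exact PySem.List.foldl_prod_mk (f := pvStep e 0) (g := pvStep e 1)
    (l := PySem.List.pyRange 0 n 1) (a := s.1) (b := s.2)

-- ===== VERDICT (by name: the statement is the Claim_ definition above) =====
theorem countC1C0_spec : Claim_equal_countC1C0 := by
  intro y n _ hpre
  unfold Spec_countC1C0 countC1C0 countC1C0_alt
  simp only [PySem.List.pyRepeat_singleton]
  have hbody : ∀ (s : List Int × List Int),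
      y.foldl (fun (s : List Int × List Int) e =>
        (PySem.List.pyRange 0 n 1).foldl (fun (s : List Int × List Int) j =>
          if PySem.List.pyGetD e j 2 == 0 then
            (PySem.List.pySetD s.1 j (PySem.List.pyGetD s.1 j 0 + 1), s.2)
          else if PySem.List.pyGetD e j 2 == 1 then
            (s.1, PySem.List.pySetD s.2 j (PySem.List.pyGetD s.2 j 0 + 1))
          else s) s) s =
      (y.foldl (fun a e => (PySem.List.pyRange 0 n 1).foldl (pvStep e 0) a) s.1,
       y.foldl (fun a e => (PySem.List.pyRange 0 n 1).foldl (pvStep e 1) a) s.2) := by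
    intro s
    have hfun2 : (fun (s : List Int × List Int) (e : List Int) =>
        (PySem.List.pyRange 0 n 1).foldl (fun (s : List Int × List Int) j =>
          if PySem.List.pyGetD e j 2 == 0 then
            (PySem.List.pySetD s.1 j (PySem.List.pyGetD s.1 j 0 + 1), s.2)
          else if PySem.List.pyGetD e j 2 == 1 then
            (s.1, PySem.List.pySetD s.2 j (PySem.List.pyGetD s.2 j 0 + 1))
          else s) s) = fun s e =>
        ((PySem.List.pyRange 0 n 1).foldl (pvStep e 0) s.1,
         (PySem.List.pyRange 0 n 1).foldl (pvStep e 1) s.2) := by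
      funext s e; exact pvBody_decomp e n s
    rw [hfun2]
    exact PySem.List.foldl_prod_mk
      (f := fun a e => (PySem.List.pyRange 0 n 1).foldl (pvStep e 0) a)
      (g := fun a e => (PySem.List.pyRange 0 n 1).foldl (pvStep e 1) a)
      (l := y) (a := s.1) (b := s.2)
  rw [hbody (List.replicate n.toNat 0, List.replicate n.toNat 0)]
  have hcomp : ∀ v : Int,
      y.foldl (fun a e => (PySem.List.pyRange 0 n 1).foldl (pvStep e v) a)
          (List.replicate n.toNat 0) =
        (PySem.List.pyRange 0 n 1).map (fun j => (PySem.List.count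
          (y.map (fun row => PySem.List.pyGetD row j 2)) v : Int)) := by
    intro v
    by_cases hpos : 0 < n
    · have hlen : ((List.replicate n.toNat (0 : Int)).length : Int) = n := by
        simp [List.length_replicate]; omega
      apply List.ext_getElem
      · rw [pvOuter_length, List.length_replicate, List.length_map,
            PySem.List.length_pyRange_one]
        omega
      · intro i h1 h2
        have hi : i < (List.replicate n.toNat (0 : Int)).length := by
          rw [pvOuter_length] at h1; exact h1
        have hgl : ∀ (l : List Int) (h : i < l.length), l[i] = l.getD i 0 := by
          intro l h; rw [List.getD_eq_getElem l 0 h]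
        rw [hgl _ h1, hgl _ h2, pvOuter_getD v n y _ hlen i hi]
        have hi2 : i < (PySem.List.pyRange 0 n 1).length := by
          rw [PySem.List.length_pyRange_one]; simp at hi; omega
        have hmap : ((PySem.List.pyRange 0 n 1).map (fun j => (PySem.List.count
            (y.map (fun row => PySem.List.pyGetD row j 2)) v : Int))).getD i 0 =
            (PySem.List.count (pvCol y ((PySem.List.pyRange 0 n 1)[i]'hi2)) v : Int) := by
          rw [List.getD_eq_getElem _ 0 h2, List.getElem_map]; rfl
        rw [hmap, PySem.List.getElem_pyRange_one]
        have hrep : (List.replicate n.toNat (0 : Int)).getD i 0 = 0 := by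
          rw [List.getD_eq_getElem _ _ hi]; simp
        rw [hrep]; simp [pvCol]
    · rw [PySem.List.pyRange_one_eq_nil (by omega)]
      have : n.toNat = 0 := by omega
      simp [this]
  rw [hcomp 0, hcomp 1]
  -- Pre_ bridges the two ports' (never-hit) out-of-range defaults: every index in
  -- range(numLabels) is a valid index of every row, so e[j] is the same element in both.
  have hsame : ∀ v : Int,
      (PySem.List.pyRange 0 n 1).map (fun j => (PySem.List.count
          (y.map (fun row => PySem.List.pyGetD row j 2)) v : Int)) =
      (PySem.List.pyRange 0 n 1).map (fun j => (PySem.List.count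
          (y.map (fun row => PySem.List.pyGetD row j 3)) v : Int)) := by
    intro v
    apply List.map_congr_left
    intro j hj
    have hjr := (PySem.List.mem_pyRange_one).1 hj
    have hrows : ∀ e ∈ y, n ≤ (e.length : Int) := by
      rcases hpre with h | h
      · intro e he; omega
      · exact h
    have hmapeq : y.map (fun row => PySem.List.pyGetD row j 2) =
        y.map (fun row => PySem.List.pyGetD row j 3) := by
      apply List.map_congr_left
      intro row hrow
      have hlen := hrows row hrow
      rw [PySem.List.pyGetD_eq_getElem _ _ (by omega) (by omega),
          PySem.List.pyGetD_eq_getElem _ _ (by omega) (by omega)]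
    rw [hmapeq]
  rw [hsame 0, hsame 1]
  simp [List.map_map, Function.comp]
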